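-- pv_equiv track=rewrite | github.com/GALJO/pythonBasics | olympiad_exercises/okiXV/stage2/plo/plo.py | count_inputs_and_outputs
-- ===== SOURCE A (Python) =====
-- def count_inputs_and_outputs(_connects):
--     _inputs = {}
--     _outputs = {}
--     _keys = set()
--     for _connect in _connects:
--         _inputs.setdefault(_connect[1], [])
--         _outputs.setdefault(_connect[0], [])
--         _inputs[_connect[1]].append(_connect[0])
--         _outputs[_connect[0]].append(_connect[1])
--         _keys.add(_connect[0])
--         _keys.add(_connect[1])
--     _keys = sorted(list(_keys))
--     return _inputs, _outputs, _keys
-- ===== SOURCE B (Python) =====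
-- def count_inputs_and_outputs(_connects):
--     heads = [c[0] for c in _connects]
--     tails = [c[1] for c in _connects]
--     _inputs = {k: [h for h, t in zip(heads, tails) if t == k] for k in dict.fromkeys(tails)}
--     _outputs = {k: [t for h, t in zip(heads, tails) if h == k] for k in dict.fromkeys(heads)}
--     _keys = sorted(set(heads) | set(tails))
--     return _inputs, _outputs, _keys
-- ===== Notes on version B (the rewrite author's own statement) =====
-- stated objective: alternative
-- what changed: B never builds dicts incrementally in a loop: it extracts the head/tail columns, then constructs each adjacency map by a dict comprehension over the deduplicated keys whose value is a fresh filtering pass over the zipped edge list (group-by-repeated-filter instead of single-pass mutable accumulation), and derives the sorted key list from the two columns.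
import Mathlib
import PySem

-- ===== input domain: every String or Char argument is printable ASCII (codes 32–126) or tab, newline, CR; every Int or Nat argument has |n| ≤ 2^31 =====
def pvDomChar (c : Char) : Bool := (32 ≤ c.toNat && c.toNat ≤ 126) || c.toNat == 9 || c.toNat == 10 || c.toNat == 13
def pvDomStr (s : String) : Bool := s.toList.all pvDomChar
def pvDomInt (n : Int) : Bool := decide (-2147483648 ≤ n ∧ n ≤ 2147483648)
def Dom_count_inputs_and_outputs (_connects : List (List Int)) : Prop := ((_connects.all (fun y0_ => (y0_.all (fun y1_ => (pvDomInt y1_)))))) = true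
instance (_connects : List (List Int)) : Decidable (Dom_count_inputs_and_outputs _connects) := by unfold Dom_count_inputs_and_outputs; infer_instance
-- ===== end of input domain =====

-- B replaces A's single-pass mutable dict accumulation by group-by-repeated-filter:
-- each adjacency map is built by one filtering pass per distinct key over the zipped
-- edge columns, and the sorted key list comes from the columns (objective: alternative).

-- shorthand for the two indexings, used by both ports
def pvG0 (c : List Int) : Int := PySem.List.pyGetD c 0 0
def pvG1 (c : List Int) : Int := PySem.List.pyGetD c 1 0

-- ===== PORT A =====
-- one fold over a triple state: _inputs, _outputs, _keys; setdefault then append, keys added in the loop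
def count_inputs_and_outputs (_connects : List (List Int)) : (List (Int × List Int)) × (List (Int × List Int)) × List Int :=
  let st := _connects.foldl
    (fun (st : PySem.Dict Int (List Int) × PySem.Dict Int (List Int) × PySem.Set Int) _connect =>
      let _inputs := st.1.setdefault (pvG1 _connect) []
      let _outputs := st.2.1.setdefault (pvG0 _connect) []
      -- _inputs[_connect[1]].append(_connect[0]) — key present after setdefault; append = modify
      let _inputs := _inputs.modify (pvG1 _connect) [] (fun l => l ++ [pvG0 _connect])
      let _outputs := _outputs.modify (pvG0 _connect) [] (fun l => l ++ [pvG1 _connect])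
      let _keys := (st.2.2.add (pvG0 _connect)).add (pvG1 _connect)
      (_inputs, _outputs, _keys))
    (PySem.Dict.empty, PySem.Dict.empty, PySem.Set.empty)
  (st.1.items, st.2.1.items, PySem.List.sorted st.2.2 (fun x => x) false)

-- ===== PORT B =====
-- two columns, then a dict comprehension per map: deduped keys, value = filter over the zipped pairs
def count_inputs_and_outputs_alt (_connects : List (List Int)) : (List (Int × List Int)) × (List (Int × List Int)) × List Int :=
  let heads := _connects.map (fun c => pvG0 c)
  let tails := _connects.map (fun c => pvG1 c)
  let pairs := heads.zip tails
  let _inputs := (PySem.List.dedup tails).map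
    (fun k => (k, (pairs.filter (fun p => p.2 == k)).map (fun p => p.1)))
  let _outputs := (PySem.List.dedup heads).map
    (fun k => (k, (pairs.filter (fun p => p.1 == k)).map (fun p => p.2)))
  let _keys := PySem.List.sorted (PySem.Set.union (PySem.Set.ofList heads) tails) (fun x => x) false
  (_inputs, _outputs, _keys)

-- ===== PRECONDITION & SPEC =====
-- A raises IndexError on any connection list with fewer than two entries; Pre_ excludes exactly those.
def Pre_count_inputs_and_outputs (_connects : List (List Int)) : Prop :=
  ∀ c ∈ _connects, 2 ≤ c.length
instance (_connects : List (List Int)) : Decidable (Pre_count_inputs_and_outputs _connects) := by unfold Pre_count_inputs_and_outputs; infer_instance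
def pvWitness_count_inputs_and_outputs : List (List Int) := [[1, 2], [2, 3], [1, 3]]

def Spec_count_inputs_and_outputs (_connects : List (List Int)) (out : (List (Int × List Int)) × (List (Int × List Int)) × List Int) : Prop := out = count_inputs_and_outputs_alt _connects
instance (_connects : List (List Int)) (out : (List (Int × List Int)) × (List (Int × List Int)) × List Int) : Decidable (Spec_count_inputs_and_outputs _connects out) := by unfold Spec_count_inputs_and_outputs; infer_instance

-- ===== CLAIM (what is proved, stated in full; the proofs are below) =====
def Claim_equal_count_inputs_and_outputs : Prop := ∀ (_connects : List (List Int)), Dom_count_inputs_and_outputs _connects → Pre_count_inputs_and_outputs _connects → Spec_count_inputs_and_outputs _connects (count_inputs_and_outputs _connects)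

-- ===== LEMMAS AND PROOFS =====

-- A's per-element dict steps and key step
def pvStepI (d : PySem.Dict Int (List Int)) (c : List Int) : PySem.Dict Int (List Int) :=
  d.modify (pvG1 c) [] (fun l => l ++ [pvG0 c])
def pvStepO (d : PySem.Dict Int (List Int)) (c : List Int) : PySem.Dict Int (List Int) :=
  d.modify (pvG0 c) [] (fun l => l ++ [pvG1 c])
def pvStepK (ks : PySem.Set Int) (c : List Int) : PySem.Set Int :=
  (ks.add (pvG0 c)).add (pvG1 c)

-- setdefault k d0 followed by modify k d0 f is modify k d0 f
lemma pv_setdefault_modify (d : PySem.Dict Int (List Int)) (k : Int) (d0 : List Int) (f : List Int → List Int) :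
    (d.setdefault k d0).modify k d0 f = d.modify k d0 f := by
  by_cases h : d.contains k = true
  · rw [PySem.Dict.setdefault_of_contains d d0 h]
  · rw [PySem.Dict.setdefault_of_not_contains d d0 (by simpa using h)]
    show ((d.insert k d0).insert k (f ((d.insert k d0).getD k d0))) = d.insert k (f (d.getD k d0))
    rw [PySem.Dict.getD_insert_self, PySem.Dict.insert_insert_self,
        PySem.Dict.getD_of_not_contains d d0 (by simpa using h)]

-- A's fold splits into three independent folds
lemma pv_fold_split (cs : List (List Int)) (d1 d2 : PySem.Dict Int (List Int)) (ks : PySem.Set Int) :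
    cs.foldl
      (fun (st : PySem.Dict Int (List Int) × PySem.Dict Int (List Int) × PySem.Set Int) c =>
        ((st.1.setdefault (pvG1 c) []).modify (pvG1 c) [] (fun l => l ++ [pvG0 c]),
         (st.2.1.setdefault (pvG0 c) []).modify (pvG0 c) [] (fun l => l ++ [pvG1 c]),
         pvStepK st.2.2 c)) (d1, d2, ks)
      = (cs.foldl pvStepI d1, cs.foldl pvStepO d2, cs.foldl pvStepK ks) := by
  induction cs generalizing d1 d2 ks with
  | nil => rfl
  | cons c cs ih =>
      simp only [List.foldl_cons]
      rw [pv_setdefault_modify d1, pv_setdefault_modify d2]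
      exact ih _ _ _

-- items of a modify-append loop over pairs = group-by over the deduped keys
lemma pv_items_group (ps : List (Int × Int)) :
    (ps.foldl (fun d p => d.modify p.1 [] (fun l => l ++ [p.2])) (PySem.Dict.empty : PySem.Dict Int (List Int))).items
      = (PySem.Set.ofList (ps.map Prod.fst)).map
          (fun k => (k, (ps.filter (fun p => p.1 == k)).map (fun p => p.2))) := by
  set d := ps.foldl (fun d p => d.modify p.1 [] (fun l => l ++ [p.2])) (PySem.Dict.empty : PySem.Dict Int (List Int)) with hd
  have hnd : d.keys.Nodup := by
    rw [hd]
    exact PySem.Dict.nodup_keys_foldl_modify_key ps Prod.fst [] (fun _ p => fun l => l ++ [p.2]) _ (by simp)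
  have hkeys : d.keys = PySem.Set.ofList (ps.map Prod.fst) := by
    rw [hd, PySem.Dict.keys_foldl_modify_key ps Prod.fst [] (fun _ p => fun l => l ++ [p.2])]
    simp [PySem.Set.update_nil_left]
  rw [PySem.Dict.items_eq_map_keys d hnd [], hkeys]
  refine List.map_congr_left (fun k hk => ?_)
  have : d.getD k [] = (ps.filter (fun p => p.1 == k)).map (fun p => p.2) := by
    rw [hd, PySem.Dict.getD_foldl_modify_append]
    simp
  rw [this]

-- membership in A's key set
lemma pv_mem_foldK (cs : List (List Int)) (ks : PySem.Set Int) (x : Int) :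
    x ∈ cs.foldl pvStepK ks ↔ x ∈ ks ∨ ∃ c ∈ cs, x = pvG0 c ∨ x = pvG1 c := by
  induction cs generalizing ks with
  | nil => simp
  | cons c cs ih =>
      simp only [List.foldl_cons, ih, pvStepK, PySem.Set.mem_add, List.mem_cons]
      constructor
      · rintro (((h | h) | h) | ⟨c', hc', h⟩)
        · exact Or.inl h
        · exact Or.inr ⟨c, Or.inl rfl, Or.inl h⟩
        · exact Or.inr ⟨c, Or.inl rfl, Or.inr h⟩
        · exact Or.inr ⟨c', Or.inr hc', h⟩
      · rintro (h | ⟨c', (rfl | hc'), h⟩)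
        · exact Or.inl (Or.inl (Or.inl h))
        · rcases h with h | h
          · exact Or.inl (Or.inl (Or.inr h))
          · exact Or.inl (Or.inr h)
        · exact Or.inr ⟨c', hc', h⟩

lemma pv_nodup_foldK (cs : List (List Int)) (ks : PySem.Set Int) (h : ks.Nodup) :
    (cs.foldl pvStepK ks).Nodup := by
  induction cs generalizing ks with
  | nil => exact h
  | cons c cs ih =>
      exact ih _ (PySem.Set.nodup_add _ _ (PySem.Set.nodup_add _ _ h))

-- ===== VERDICT (by name: the statement is the Claim_ definition above) =====
theorem count_inputs_and_outputs_spec : Claim_equal_count_inputs_and_outputs := by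
  unfold Claim_equal_count_inputs_and_outputs
  intro cs _ _
  unfold Spec_count_inputs_and_outputs count_inputs_and_outputs count_inputs_and_outputs_alt
  show
    (let st := cs.foldl
        (fun (st : PySem.Dict Int (List Int) × PySem.Dict Int (List Int) × PySem.Set Int) c =>
          ((st.1.setdefault (pvG1 c) []).modify (pvG1 c) [] (fun l => l ++ [pvG0 c]),
           (st.2.1.setdefault (pvG0 c) []).modify (pvG0 c) [] (fun l => l ++ [pvG1 c]),
           pvStepK st.2.2 c)) (PySem.Dict.empty, PySem.Dict.empty, PySem.Set.empty)
     (st.1.items, st.2.1.items, PySem.List.sorted st.2.2 (fun x => x) false)) = _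
  rw [pv_fold_split]
  have hzip : (cs.map (fun c => pvG0 c)).zip (cs.map (fun c => pvG1 c))
      = cs.map (fun c => (pvG0 c, pvG1 c)) := List.zip_map'
  refine Prod.ext ?_ (Prod.ext ?_ ?_)
  -- _inputs
  · show (cs.foldl pvStepI PySem.Dict.empty).items = _
    have : cs.foldl pvStepI PySem.Dict.empty
        = (cs.map (fun c => (pvG1 c, pvG0 c))).foldl
            (fun d p => d.modify p.1 [] (fun l => l ++ [p.2])) PySem.Dict.empty := by
      rw [List.foldl_map]; rfl
    rw [this, pv_items_group]
    simp only [hzip, List.map_map, List.filter_map, List.map_map]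
    rfl
  -- _outputs
  · show (cs.foldl pvStepO PySem.Dict.empty).items = _
    have : cs.foldl pvStepO PySem.Dict.empty
        = (cs.map (fun c => (pvG0 c, pvG1 c))).foldl
            (fun d p => d.modify p.1 [] (fun l => l ++ [p.2])) PySem.Dict.empty := by
      rw [List.foldl_map]; rfl
    rw [this, pv_items_group]
    simp only [hzip, List.map_map, List.filter_map, List.map_map]
    rfl
  -- _keys
  · show PySem.List.sorted (cs.foldl pvStepK PySem.Set.empty) (fun x => x) false = _
    rw [PySem.List.sorted_id_eq_sorted_id_iff_perm]
    have hnB : (PySem.Set.union (PySem.Set.ofList (cs.map (fun c => pvG0 c))) (cs.map (fun c => pvG1 c))).Nodup :=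
      PySem.Set.nodup_union _ _ (PySem.Set.nodup_ofList _)
    rw [List.perm_ext_iff_of_nodup (pv_nodup_foldK cs PySem.Set.empty List.nodup_nil) hnB]
    intro x
    rw [pv_mem_foldK, PySem.Set.mem_union, PySem.Set.mem_ofList]
    simp only [PySem.Set.empty, List.not_mem_nil, false_or, List.mem_map]
    constructor
    · rintro ⟨c, hc, h | h⟩
      · exact Or.inl ⟨c, hc, h.symm⟩
      · exact Or.inr ⟨c, hc, h.symm⟩
    · rintro (⟨c, hc, h⟩ | ⟨c, hc, h⟩)
      · exact ⟨c, hc, Or.inl h.symm⟩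
      · exact ⟨c, hc, Or.inr h.symm⟩
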